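-- pv_equiv track=rewrite | github.com/srkicaa/SEO-TITLE-GEN | streamlit_app/utils.py | _build_header_map
-- ===== SOURCE A (Python) =====
-- from typing import Any, Dict, Iterable, List, Optional, Sequence, Tuple
--
-- HEADER_ALIASES: Dict[str, Iterable[str]] = {
--     "domain": ("domain", "target domain", "site", "target", "target_domain"),
--     "anchor_keyword": (
--         "anchor",
--         "anchor keyword",
--         "anchor text",
--         "anchor_keyword",
--     ),
--     "anchor_country": (
--         "anchor country",
--         "brand country",
--         "anchor region",
--         "brand region",
--         "anchor_country",
--     ),
--     "target_url": (
--         "target url",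
--         "url",
--         "anchor url",
--         "destination url",
--         "target_url",
--         "anchor_url",
--     ),
--     "serp_keyword": (
--         "serp keyword",
--         "keyword",
--         "search keyword",
--         "query",
--         "serp_keyword",
--     ),
-- }
--
-- def _build_header_map(headers: Sequence[str]) -> Dict[int, str]:
--     mapping: Dict[int, str] = {}
--     for idx, header in enumerate(headers):
--         key = header.strip().lower()
--         for canonical, aliases in HEADER_ALIASES.items():
--             if key == canonical or key in aliases:
--                 mapping[idx] = canonical
--                 break
--     return mapping
-- ===== SOURCE B (Python) =====
-- from typing import Dict, Iterable, Sequence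
--
-- HEADER_ALIASES: Dict[str, Iterable[str]] = {
--     "domain": ("domain", "target domain", "site", "target", "target_domain"),
--     "anchor_keyword": (
--         "anchor",
--         "anchor keyword",
--         "anchor text",
--         "anchor_keyword",
--     ),
--     "anchor_country": (
--         "anchor country",
--         "brand country",
--         "anchor region",
--         "brand region",
--         "anchor_country",
--     ),
--     "target_url": (
--         "target url",
--         "url",
--         "anchor url",
--         "destination url",
--         "target_url",
--         "anchor_url",
--     ),
--     "serp_keyword": (
--         "serp keyword",
--         "keyword",
--         "search keyword",
--         "query",
--         "serp_keyword",
--     ),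
-- }
--
--
-- def _build_header_map(headers: Sequence[str]) -> Dict[int, str]:
--     # Inverted loop order: sweep the alias TABLE on the outside and the headers
--     # on the inside.  Each group claims every still-unclaimed header it matches,
--     # so an earlier group in HEADER_ALIASES order wins ties; a final sort by
--     # index restores the index-ascending order of the result.
--     keys = [h.strip().lower() for h in headers]
--     claimed = set()
--     pairs = []
--     for canonical, aliases in HEADER_ALIASES.items():
--         names = {canonical, *aliases}
--         for idx, key in enumerate(keys):
--             if idx not in claimed and key in names:
--                 claimed.add(idx)
--                 pairs.append((idx, canonical))
--     pairs.sort(key=lambda p: p[0])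
--     return dict(pairs)
-- ===== Notes on version B (the rewrite author's own statement) =====
-- stated objective: alternative
-- what changed: B inverts the loop nesting: it sweeps the alias table on the outside, each group claiming the still-unclaimed matching header indices (so earlier groups win ties), and restores index order with a final sort instead of A's per-header inner scan with break.
import Mathlib
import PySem

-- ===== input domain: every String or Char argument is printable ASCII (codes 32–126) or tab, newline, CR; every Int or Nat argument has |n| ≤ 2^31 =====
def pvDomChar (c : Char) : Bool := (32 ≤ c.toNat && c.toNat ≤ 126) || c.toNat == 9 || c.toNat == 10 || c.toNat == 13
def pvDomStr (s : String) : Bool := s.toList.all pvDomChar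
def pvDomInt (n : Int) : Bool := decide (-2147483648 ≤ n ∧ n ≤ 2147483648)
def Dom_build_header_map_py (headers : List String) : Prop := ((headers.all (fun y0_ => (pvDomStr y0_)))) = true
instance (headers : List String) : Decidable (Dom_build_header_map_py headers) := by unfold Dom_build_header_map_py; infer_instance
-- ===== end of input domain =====

-- B inverts the loop nesting: it sweeps the alias table on the OUTSIDE, letting each group
-- claim the still-unclaimed matching headers, and restores index order with a final sort (alternative decomposition, not claimed faster).

-- ===== PORT A =====
-- the module constant HEADER_ALIASES (dict of canonical -> tuple of aliases), shared data
def headerAliases : List (String × List String) :=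
  [ ("domain", ["domain", "target domain", "site", "target", "target_domain"]),
    ("anchor_keyword", ["anchor", "anchor keyword", "anchor text", "anchor_keyword"]),
    ("anchor_country", ["anchor country", "brand country", "anchor region", "brand region", "anchor_country"]),
    ("target_url", ["target url", "url", "anchor url", "destination url", "target_url", "anchor_url"]),
    ("serp_keyword", ["serp keyword", "keyword", "search keyword", "query", "serp_keyword"]) ]

-- inner 'for canonical, aliases in HEADER_ALIASES.items(): if key == canonical or key in aliases: …; break'
def findCanonical (key : String) : List (String × List String) → Option String
  | [] => none
  | (canonical, aliases) :: rest =>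
      if key == canonical || aliases.contains key then some canonical
      else findCanonical key rest

-- 'for idx, header in enumerate(headers)' as structural recursion carrying idx
def goA (d : PySem.Dict Int String) (idx : Int) : List String → PySem.Dict Int String
  | [] => d
  | header :: rest =>
      let key := PySem.Str.lower (PySem.Str.strip header)
      match findCanonical key headerAliases with
      | some canonical => goA (d.insert idx canonical) (idx + 1) rest
      | none => goA d (idx + 1) rest

def build_header_map_py (headers : List String) : List (Int × String) :=
  (goA PySem.Dict.empty 0 headers).items

-- ===== PORT B =====
-- inner 'for idx, key in enumerate(keys): if idx not in claimed and key in names: claimed.add(idx); pairs.append((idx, canonical))'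
def claimGroup (names : PySem.Set String) (canonical : String)
    (st : PySem.Set Int × List (Int × String)) (eks : List (Int × String)) :
    PySem.Set Int × List (Int × String) :=
  eks.foldl (fun st p =>
    if !(PySem.Set.contains st.1 p.1) && PySem.Set.contains names p.2 then
      (PySem.Set.add st.1 p.1, st.2 ++ [(p.1, canonical)])
    else st) st

def build_header_map_py_alt (headers : List String) : List (Int × String) :=
  let keys := headers.map (fun h => PySem.Str.lower (PySem.Str.strip h))
  let eks := PySem.List.enumerate keys 0
  let st := headerAliases.foldl
    (fun st g => claimGroup (PySem.Set.ofList (g.1 :: g.2)) g.1 st eks)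
    (PySem.Set.empty, [])
  let pairsSorted := PySem.List.sorted st.2 (fun p => p.1)
  (pairsSorted.foldl (fun d p => d.insert p.1 p.2) PySem.Dict.empty).items

-- ===== PRECONDITION & SPEC =====
def Spec_build_header_map_py (headers : List String) (out : List (Int × String)) : Prop := out = build_header_map_py_alt headers
instance (headers : List String) (out : List (Int × String)) : Decidable (Spec_build_header_map_py headers out) := by unfold Spec_build_header_map_py; infer_instance

-- ===== CLAIM (what is proved, stated in full; the proofs are below) =====
def Claim_equal_build_header_map_py : Prop := ∀ (headers : List String), Dom_build_header_map_py headers → Spec_build_header_map_py headers (build_header_map_py headers)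

-- ===== LEMMAS AND PROOFS =====

-- 'first group of gs (if any) matched by p, skipping claimed indices S', as an Option-valued map
def mFind (S : PySem.Set Int) (gs : List (String × List String)) (p : Int × String) : Option (Int × String) :=
  if PySem.Set.contains S p.1 then none
  else (findCanonical p.2 gs).map (fun c => (p.1, c))

-- the pairs B's outer loop appends, group by group
def chunks (eks : List (Int × String)) (S : PySem.Set Int) :
    List (String × List String) → List (Int × String)
  | [] => []
  | g :: rest =>
      let M := eks.filter (fun p => !(PySem.Set.contains S p.1) &&
                                    PySem.Set.contains (PySem.Set.ofList (g.1 :: g.2)) p.2)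
      M.map (fun p => (p.1, g.1)) ++ chunks eks (PySem.Set.update S (M.map (·.1))) rest

theorem fst_inj_of_pairwise_lt {α : Type} :
    ∀ (l : List (Int × α)), l.Pairwise (fun a b => a.1 < b.1) →
      ∀ x ∈ l, ∀ y ∈ l, x.1 = y.1 → x = y := by
  intro l hpw x hx y hy hxy
  by_contra hne
  have h2 : l.Pairwise (fun a b : Int × α => a.1 ≠ b.1) := hpw.imp (fun h => ne_of_lt h)
  exact absurd hxy (List.Pairwise.forall (fun _ _ h => h.symm) h2 hx hy hne)

-- A's loop produces exactly the first-match pairs, in index order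
theorem goA_items (hs : List String) :
    ∀ (d : PySem.Dict Int String) (idx : Int), (∀ k ∈ d.keys, k < idx) →
      (goA d idx hs).items =
        d.items ++
          (PySem.List.enumerate (hs.map (fun h => PySem.Str.lower (PySem.Str.strip h))) idx).filterMap
            (mFind PySem.Set.empty headerAliases) := by
  induction hs with
  | nil => intro d idx _; simp [goA]
  | cons h t ih =>
      intro d idx hlt
      have hfresh : d.contains idx = false := by
        by_contra hc
        have : idx ∈ d.keys := (PySem.Dict.contains_iff_mem_keys d idx).mp (by
          cases hcc : d.contains idx
          · exact absurd hcc hc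
          · rfl)
        exact absurd (hlt idx this) (lt_irrefl idx)
      have hm : mFind PySem.Set.empty headerAliases (idx, PySem.Str.lower (PySem.Str.strip h)) =
          (findCanonical (PySem.Str.lower (PySem.Str.strip h)) headerAliases).map (fun c => (idx, c)) := by
        simp [mFind, PySem.Set.contains, PySem.Set.empty]
      simp only [List.map_cons, PySem.List.enumerate_cons, List.filterMap_cons, hm]
      cases hf : findCanonical (PySem.Str.lower (PySem.Str.strip h)) headerAliases with
      | none =>
          simp only [goA, hf, Option.map_none]
          exact ih d (idx + 1) (fun k hk => lt_trans (hlt k hk) (by omega))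
      | some c =>
          simp only [goA, hf, Option.map_some]
          rw [ih (d.insert idx c) (idx + 1) (fun k hk => by
            rcases (PySem.Dict.mem_keys_insert d idx k c).mp hk with rfl | hk
            · omega
            · exact lt_trans (hlt k hk) (by omega))]
          rw [PySem.Dict.items_insert_of_not_contains d c hfresh]
          simp

-- one group's inner sweep: it claims the unclaimed matching indices and appends their pairs
theorem claimGroup_eq (names : PySem.Set String) (c : String) :
    ∀ (eks : List (Int × String)), (eks.map (·.1)).Nodup →
      ∀ (S : PySem.Set Int) (P : List (Int × String)),
        claimGroup names c (S, P) eks =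
          (PySem.Set.update S
              ((eks.filter (fun p => !(PySem.Set.contains S p.1) && PySem.Set.contains names p.2)).map (·.1)),
           P ++ (eks.filter (fun p => !(PySem.Set.contains S p.1) && PySem.Set.contains names p.2)).map
              (fun p => (p.1, c))) := by
  intro eks
  induction eks with
  | nil => intro _ S P; simp [claimGroup, PySem.Set.update]
  | cons e t ih =>
      intro hnd S P
      have hnd' : (t.map (·.1)).Nodup := (List.nodup_cons.mp (by simpa using hnd)).2
      have hnotmem : e.1 ∉ t.map (·.1) := (List.nodup_cons.mp (by simpa using hnd)).1
      cases hq : (!(PySem.Set.contains S e.1) && PySem.Set.contains names e.2) with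
      | true =>
          have hfilter : t.filter (fun p => !(PySem.Set.contains (PySem.Set.add S e.1) p.1) && PySem.Set.contains names p.2)
              = t.filter (fun p => !(PySem.Set.contains S p.1) && PySem.Set.contains names p.2) := by
            apply List.filter_congr
            intro x hx
            have hne : x.1 ≠ e.1 := by
              intro hcontra
              exact hnotmem (hcontra ▸ List.mem_map.mpr ⟨x, hx, rfl⟩)
            have : PySem.Set.contains (PySem.Set.add S e.1) x.1 = PySem.Set.contains S x.1 := by
              simp [PySem.Set.contains, PySem.Set.mem_add, hne]
            rw [this]
          have step : claimGroup names c (S, P) (e :: t)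
              = claimGroup names c (PySem.Set.add S e.1, P ++ [(e.1, c)]) t := by
            unfold claimGroup
            rw [List.foldl_cons]
            congr 1
            rw [if_pos hq]
          have hfc : List.filter (fun p => !(PySem.Set.contains S p.1) && PySem.Set.contains names p.2) (e :: t)
              = e :: List.filter (fun p => !(PySem.Set.contains S p.1) && PySem.Set.contains names p.2) t := by
            rw [List.filter_cons]
            rw [if_pos hq]
          rw [step, ih hnd' (PySem.Set.add S e.1) (P ++ [(e.1, c)]), hfilter, hfc,
              List.map_cons, List.map_cons]
          simp only [Prod.mk.injEq]
          exact ⟨by simp [PySem.Set.update], by simp⟩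
      | false =>
          have step : claimGroup names c (S, P) (e :: t) = claimGroup names c (S, P) t := by
            unfold claimGroup
            rw [List.foldl_cons]
            congr 1
            rw [if_neg (fun h => by rw [hq] at h; exact Bool.false_ne_true h)]
          have hfc : List.filter (fun p => !(PySem.Set.contains S p.1) && PySem.Set.contains names p.2) (e :: t)
              = List.filter (fun p => !(PySem.Set.contains S p.1) && PySem.Set.contains names p.2) t := by
            rw [List.filter_cons]
            rw [if_neg (fun h => by rw [hq] at h; exact Bool.false_ne_true h)]
          rw [step, ih hnd' S P, hfc]

-- the outer loop over the table, from any starting state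
theorem outer_eq (eks : List (Int × String)) (hnd : (eks.map (·.1)).Nodup) :
    ∀ (gs : List (String × List String)) (S : PySem.Set Int) (P : List (Int × String)),
      (gs.foldl (fun st g => claimGroup (PySem.Set.ofList (g.1 :: g.2)) g.1 st eks) (S, P)).2
        = P ++ chunks eks S gs := by
  intro gs
  induction gs with
  | nil => intro S P; simp [chunks]
  | cons g rest ih =>
      intro S P
      simp only [List.foldl_cons, claimGroup_eq _ _ eks hnd S P, chunks]
      rw [ih]
      simp

-- splitting a filterMap at a predicate on which the function is forced (up to permutation)
theorem filterMap_perm_split {α β : Type} (E : List α) (f : α → Option β) (q : α → Bool)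
    (g : α → β) (f' : α → Option β)
    (h1 : ∀ x ∈ E, q x = true → f x = some (g x))
    (h2 : ∀ x ∈ E, q x = false → f x = f' x)
    (h3 : ∀ x ∈ E, q x = true → f' x = none) :
    (E.filterMap f).Perm ((E.filter q).map g ++ E.filterMap f') := by
  induction E with
  | nil => simp
  | cons e t ih =>
      have ih' := ih (fun x hx => h1 x (List.mem_cons_of_mem e hx))
        (fun x hx => h2 x (List.mem_cons_of_mem e hx))
        (fun x hx => h3 x (List.mem_cons_of_mem e hx))
      cases hq : q e with
      | true =>
          rw [List.filterMap_cons, h1 e (List.mem_cons_self) hq,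
              List.filter_cons_of_pos hq, List.map_cons, List.filterMap_cons,
              h3 e (List.mem_cons_self) hq]
          exact List.Perm.cons _ ih'
      | false =>
          rw [List.filterMap_cons, h2 e (List.mem_cons_self) hq,
              List.filter_cons_of_neg (by simp [hq]), List.filterMap_cons]
          cases hf : f' e with
          | none => simpa using ih'
          | some b =>
              exact (List.Perm.cons b ih').trans List.perm_middle.symm

-- membership form of PySem.Set.contains, used to discharge the if-conditions below
theorem set_contains_true {α : Type} [BEq α] [LawfulBEq α] {S : PySem.Set α} {x : α}
    (h : x ∈ S) : PySem.Set.contains S x = true := by simp [PySem.Set.contains, h]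

-- B's chunk list is a permutation of the first-match pairs
theorem chunks_perm (eks : List (Int × String))
    (hpw : eks.Pairwise (fun a b => a.1 < b.1)) :
    ∀ (gs : List (String × List String)) (S : PySem.Set Int),
      (eks.filterMap (mFind S gs)).Perm (chunks eks S gs) := by
  have hinj := fst_inj_of_pairwise_lt eks hpw
  intro gs
  induction gs with
  | nil =>
      intro S
      have : eks.filterMap (mFind S []) = [] := by
        rw [List.filterMap_eq_nil_iff]
        intro a _
        simp [mFind, findCanonical]
      rw [this]; simp [chunks]
  | cons g rest ih =>
      intro S
      obtain ⟨gc, ga⟩ := g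
      set q : (Int × String) → Bool :=
        fun p => !(PySem.Set.contains S p.1) && PySem.Set.contains (PySem.Set.ofList (gc :: ga)) p.2 with hqdef
      set M := eks.filter q with hM
      set S' := PySem.Set.update S (M.map (·.1)) with hS'
      have hmemM : ∀ x ∈ eks, (x.1 ∈ M.map (·.1) ↔ q x = true) := by
        intro x hx
        constructor
        · intro hxm
          rcases List.mem_map.mp hxm with ⟨y, hyM, hyx⟩
          have hyE : y ∈ eks := List.mem_of_mem_filter hyM
          have : y = x := hinj y hyE x hx hyx
          subst this
          exact List.of_mem_filter hyM
        · intro hq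
          exact List.mem_map.mpr ⟨x, List.mem_filter.mpr ⟨hx, hq⟩, rfl⟩
      have hqmem : ∀ x : Int × String, q x = true → x.1 ∉ S ∧ x.2 ∈ gc :: ga := by
        intro x hq
        rcases (Bool.and_eq_true _ _).mp hq with ⟨h1, h2⟩
        constructor
        · intro hmem
          rw [set_contains_true hmem] at h1
          simp at h1
        · exact (PySem.Set.mem_ofList _ _).mp (by simpa [PySem.Set.contains] using h2)
      have hqtrue : ∀ x : Int × String, x.1 ∉ S → x.2 ∈ gc :: ga → q x = true := by
        intro x h1 h2
        simp [hqdef, PySem.Set.contains, PySem.Set.mem_ofList]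
        exact ⟨h1, List.mem_cons.mp h2⟩
      have hmatch : ∀ x : Int × String, x.2 ∈ gc :: ga →
          findCanonical x.2 ((gc, ga) :: rest) = some gc := by
        intro x h2
        show (if x.2 == gc || ga.contains x.2 then some gc else findCanonical x.2 rest) = some gc
        rcases List.mem_cons.mp h2 with h | h
        · rw [if_pos (by simp [h])]
        · rw [if_pos (by simp [h])]
      have hnomatch : ∀ x : Int × String, x.2 ∉ gc :: ga →
          findCanonical x.2 ((gc, ga) :: rest) = findCanonical x.2 rest := by
        intro x h2
        show (if x.2 == gc || ga.contains x.2 then some gc else findCanonical x.2 rest) = _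
        rw [if_neg]
        intro hc
        rcases Bool.or_eq_true _ _ |>.mp hc with h | h
        · exact h2 (by rw [eq_of_beq h]; exact List.mem_cons_self)
        · exact h2 (List.mem_cons_of_mem _ (List.contains_iff_mem.mp h))
      have split := filterMap_perm_split eks (mFind S ((gc, ga) :: rest)) q
          (fun p => (p.1, gc)) (mFind S' rest)
          (by
            intro x _ hq
            rcases hqmem x hq with ⟨h1, h2⟩
            simp [mFind, PySem.Set.contains, h1, hmatch x h2])
          (by
            intro x hx hq
            by_cases hs : x.1 ∈ S
            · have hs2 : x.1 ∈ S' := by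
                rw [hS']; exact (PySem.Set.mem_update S _ x.1).mpr (Or.inl hs)
              simp [mFind, hs, hs2]
            · have hnm : x.2 ∉ gc :: ga := by
                intro hmem
                rw [hqtrue x hs hmem] at hq
                exact absurd hq (by decide)
              have hnotM : x.1 ∉ M.map (·.1) := fun hc => by
                rw [(hmemM x hx).mp hc] at hq
                exact absurd hq (by decide)
              have hs2 : x.1 ∉ S' := by
                rw [hS']
                intro hc
                rcases (PySem.Set.mem_update S _ x.1).mp hc with h | h
                · exact hs h
                · exact hnotM h
              simp [mFind, hs, hs2, hnomatch x hnm])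
          (by
            intro x hx hq
            have hs2 : x.1 ∈ S' := by
              rw [hS']
              exact (PySem.Set.mem_update S _ x.1).mpr (Or.inr ((hmemM x hx).mpr hq))
            simp [mFind, hs2])
      refine split.trans ?_
      show (M.map (fun p => (p.1, gc)) ++ eks.filterMap (mFind S' rest)).Perm
        (chunks eks S ((gc, ga) :: rest))
      simp only [chunks]
      exact List.Perm.append_left _ (ih S')

theorem mFind_fst {S : PySem.Set Int} {gs : List (String × List String)}
    {p b : Int × String} (h : mFind S gs p = some b) : b.1 = p.1 := by
  unfold mFind at h
  split at h
  · exact absurd h (by simp)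
  · rcases Option.map_eq_some_iff.mp h with ⟨c, _, rfl⟩
    rfl

-- ===== VERDICT (by name: the statement is the Claim_ definition above) =====
theorem build_header_map_py_spec : Claim_equal_build_header_map_py := by
  intro headers _
  unfold Spec_build_header_map_py build_header_map_py build_header_map_py_alt
  dsimp only
  set keys := headers.map (fun h => PySem.Str.lower (PySem.Str.strip h)) with hkeys
  set eks := PySem.List.enumerate keys 0 with heks
  set ys := eks.filterMap (mFind PySem.Set.empty headerAliases) with hys
  have hpw : eks.Pairwise (fun a b : Int × String => a.1 < b.1) :=
    PySem.List.pairwise_lt_enumerate keys 0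
  have hnd : (eks.map (·.1)).Nodup := by
    have : (eks.map (·.1)).Pairwise (· < ·) := List.pairwise_map.mpr hpw
    exact List.Pairwise.imp (fun h => ne_of_lt h) this
  have hyspw : ys.Pairwise (fun a b : Int × String => a.1 < b.1) := by
    rw [hys, List.pairwise_filterMap]
    refine hpw.imp ?_
    intro a b hab x hx y hy
    rw [mFind_fst hx, mFind_fst hy]
    exact hab
  -- A's side
  have hA : (goA PySem.Dict.empty 0 headers).items = ys := by
    rw [goA_items headers PySem.Dict.empty 0 (by simp [PySem.Dict.empty, PySem.Dict.keys])]
    simp only [← hkeys, ← heks]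
    simp [PySem.Dict.empty]
    exact hys.symm
  -- B's side
  have hP : (headerAliases.foldl
      (fun st g => claimGroup (PySem.Set.ofList (g.1 :: g.2)) g.1 st eks)
      (PySem.Set.empty, [])).2 = chunks eks PySem.Set.empty headerAliases := by
    rw [outer_eq eks hnd headerAliases PySem.Set.empty []]
    simp
  have hsorted : PySem.List.sorted (headerAliases.foldl
      (fun st g => claimGroup (PySem.Set.ofList (g.1 :: g.2)) g.1 st eks)
      (PySem.Set.empty, [])).2 (fun p : Int × String => p.1) = ys := by
    rw [hP]
    exact PySem.List.sorted_eq_of_perm_of_pairwise_lt _ ys (fun p => p.1)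
      (chunks_perm eks hpw headerAliases PySem.Set.empty) hyspw
  rw [hA, hsorted]
  have hysnd : (ys.map (fun p : Int × String => p.1)).Nodup := by
    have : (ys.map (fun p : Int × String => p.1)).Pairwise (· < ·) := List.pairwise_map.mpr hyspw
    exact List.Pairwise.imp (fun h => ne_of_lt h) this
  rw [PySem.Dict.items_foldl_insert_fresh ys (fun p => p.1) (fun p => p.2) PySem.Dict.empty
      (fun a _ => by simp [pysem]) hysnd]
  simp [PySem.Dict.empty]
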